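-- pv_equiv track=rewrite | github.com/Amellado/Notifications | attention_notify.py | _merge_root_toml_key
-- ===== SOURCE A (Python) =====
-- def _merge_root_toml_key(text: str, key: str, value_toml: str) -> str:
--     lines = text.splitlines()
--     key_prefix = f"{key} = "
--     for index, line in enumerate(lines):
--         stripped = line.strip()
--         if stripped.startswith(key_prefix):
--             lines[index] = f"{key_prefix}{value_toml}"
--             return "\n".join(lines).rstrip() + "\n"
--
--     insert_at = len(lines)
--     for index, line in enumerate(lines):
--         stripped = line.strip()
--         if stripped.startswith("[") and not stripped.startswith("#"):
--             insert_at = index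
--             break
--     lines.insert(insert_at, f"{key_prefix}{value_toml}")
--     return "\n".join(lines).rstrip() + "\n"
-- ===== SOURCE B (Python) =====
-- def _merge_root_toml_key(text: str, key: str, value_toml: str) -> str:
--     prefix = key + " = "
--     new_line = prefix + value_toml
--
--     def replaced(ls):
--         # list with the first key line replaced, or None if there is none
--         if not ls:
--             return None
--         if ls[0].strip().startswith(prefix):
--             return [new_line] + ls[1:]
--         tail = replaced(ls[1:])
--         return None if tail is None else [ls[0]] + tail
--
--     def inserted(ls):
--         # new key line inserted before the first non-comment table header (or at the end)
--         if not ls: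
--             return [new_line]
--         s = ls[0].strip()
--         if s.startswith("[") and not s.startswith("#"):
--             return [new_line] + ls
--         return [ls[0]] + inserted(ls[1:])
--
--     lines = text.splitlines()
--     out = replaced(lines)
--     if out is None:
--         out = inserted(lines)
--     return "\n".join(out).rstrip() + "\n"
-- ===== Notes on version B (the rewrite author's own statement) =====
-- stated objective: alternative
-- what changed: B is index-free and purely structural: two small recursive functions build the output list directly (replaced: Optional list with the first key line rewritten; inserted: list with the new line placed before the first non-comment header), replacing A's enumerate/index bookkeeping, in-place mutation and list.insert.
import Mathlib
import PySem

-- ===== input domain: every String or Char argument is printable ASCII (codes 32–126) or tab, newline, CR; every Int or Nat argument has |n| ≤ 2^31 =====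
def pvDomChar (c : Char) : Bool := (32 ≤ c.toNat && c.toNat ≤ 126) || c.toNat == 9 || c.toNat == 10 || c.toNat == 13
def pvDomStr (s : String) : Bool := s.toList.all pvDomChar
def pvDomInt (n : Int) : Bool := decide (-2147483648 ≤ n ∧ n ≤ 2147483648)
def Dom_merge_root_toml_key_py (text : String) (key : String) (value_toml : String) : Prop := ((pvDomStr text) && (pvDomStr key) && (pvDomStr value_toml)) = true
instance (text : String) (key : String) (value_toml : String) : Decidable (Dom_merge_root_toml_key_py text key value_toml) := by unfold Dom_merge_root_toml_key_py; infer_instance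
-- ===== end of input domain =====

-- B rebuilds the line list with two small recursive functions (replace-first / insert-before-header)
-- instead of A's enumerate/index bookkeeping, mutation and list.insert (objective: alternative).

-- shared rendering step: "\n".join(lines).rstrip() + "\n"
def pvRender (lines : List String) : String :=
  PySem.Str.rstrip (PySem.Str.join "\n" lines) ++ "\n"

-- ===== PORT A =====
-- first loop of A: replace the first line whose stripped form starts with the key prefix, return rendered
def pvLoopA (pref newl : String) (done rest : List String) : Option String :=
  match rest with
  | [] => none
  | l :: rs =>
    if PySem.Str.startswith (PySem.Str.strip l) pref then
      some (pvRender (done ++ newl :: rs))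
    else pvLoopA pref newl (done ++ [l]) rs

-- second loop of A: index of the first non-comment table header ('break' loop)
def pvHdrA (rest : List String) : Option Nat :=
  match rest with
  | [] => none
  | l :: rs =>
    if PySem.Str.startswith (PySem.Str.strip l) "[" && !PySem.Str.startswith (PySem.Str.strip l) "#" then
      some 0
    else (pvHdrA rs).map (· + 1)

def merge_root_toml_key_py (text : String) (key : String) (value_toml : String) : String :=
  let lines := PySem.Str.splitlines text
  let pref := key ++ " = "
  match pvLoopA pref (pref ++ value_toml) [] lines with
  | some s => s
  | none =>
    let insert_at := (pvHdrA lines).getD lines.length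
    pvRender (List.insertIdx lines insert_at (pref ++ value_toml))

-- ===== PORT B =====
-- B's 'replaced': the list with the first key line replaced, or none
def pvReplaced (pref newl : String) : List String → Option (List String)
  | [] => none
  | l :: rs =>
    if PySem.Str.startswith (PySem.Str.strip l) pref then
      some (newl :: rs)
    else (pvReplaced pref newl rs).map (l :: ·)

-- B's 'inserted': the new line inserted before the first non-comment table header (or at the end)
def pvInserted (newl : String) : List String → List String
  | [] => [newl]
  | l :: rs =>
    if PySem.Str.startswith (PySem.Str.strip l) "[" && !PySem.Str.startswith (PySem.Str.strip l) "#" then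
      newl :: l :: rs
    else l :: pvInserted newl rs

def merge_root_toml_key_py_alt (text : String) (key : String) (value_toml : String) : String :=
  let pref := key ++ " = "
  let newl := pref ++ value_toml
  let lines := PySem.Str.splitlines text
  match pvReplaced pref newl lines with
  | some out => pvRender out
  | none => pvRender (pvInserted newl lines)

-- ===== PRECONDITION & SPEC =====
def Spec_merge_root_toml_key_py (text : String) (key : String) (value_toml : String) (out : String) : Prop := out = merge_root_toml_key_py_alt text key value_toml
instance (text : String) (key : String) (value_toml : String) (out : String) : Decidable (Spec_merge_root_toml_key_py text key value_toml out) := by unfold Spec_merge_root_toml_key_py; infer_instance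

-- ===== CLAIM (what is proved, stated in full; the proofs are below) =====
def Claim_equal_merge_root_toml_key_py : Prop := ∀ (text : String) (key : String) (value_toml : String), Dom_merge_root_toml_key_py text key value_toml → Spec_merge_root_toml_key_py text key value_toml (merge_root_toml_key_py text key value_toml)

-- ===== LEMMAS AND PROOFS =====

-- A's first loop renders exactly B's 'replaced' list (prefixed by the accumulator)
lemma pvLoopA_eq_replaced (pref newl : String) :
    ∀ (rest done : List String),
      pvLoopA pref newl done rest =
        (pvReplaced pref newl rest).map (fun t => pvRender (done ++ t)) := by
  intro rest
  induction rest with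
  | nil => intro done; simp [pvLoopA, pvReplaced]
  | cons l rs ih =>
    intro done
    by_cases h : PySem.Chars.startswith (PySem.Chars.strip l.toList) pref.toList = true
    · simp [pvLoopA, pvReplaced, h]
    · simp only [Bool.not_eq_true] at h
      rw [show pvLoopA pref newl done (l :: rs) = pvLoopA pref newl (done ++ [l]) rs from by
        simp [pvLoopA, PySem.Str.startswith, PySem.Str.strip, h]]
      rw [ih]
      cases hr : pvReplaced pref newl rs <;>
        simp [pvReplaced, PySem.Str.startswith, PySem.Str.strip, h, hr]

-- inserting at A's header index is B's 'inserted'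
lemma insertIdx_eq_inserted (newl : String) :
    ∀ (ls : List String),
      List.insertIdx ls ((pvHdrA ls).getD ls.length) newl = pvInserted newl ls := by
  intro ls
  induction ls with
  | nil => simp [pvHdrA, pvInserted]
  | cons l rs ih =>
    by_cases ha : PySem.Chars.startswith (PySem.Chars.strip l.toList) ['['] = true
    · by_cases hb : PySem.Chars.startswith (PySem.Chars.strip l.toList) ['#'] = true
      · cases hk : pvHdrA rs <;>
          simp [pvHdrA, pvInserted, PySem.Str.startswith, PySem.Str.strip, ha, hb, hk,
            List.insertIdx_succ_cons, ← ih]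
      · simp [pvHdrA, pvInserted, PySem.Str.startswith, PySem.Str.strip, ha, hb]
    · cases hk : pvHdrA rs <;>
        simp [pvHdrA, pvInserted, PySem.Str.startswith, PySem.Str.strip, ha, hk,
          List.insertIdx_succ_cons, ← ih]

theorem merge_root_toml_key_py_eq (text key value_toml : String) :
    merge_root_toml_key_py text key value_toml = merge_root_toml_key_py_alt text key value_toml := by
  unfold merge_root_toml_key_py merge_root_toml_key_py_alt
  simp only [pvLoopA_eq_replaced]
  cases hr : pvReplaced (key ++ " = ") (key ++ " = " ++ value_toml) (PySem.Str.splitlines text) with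
  | some out => simp
  | none => simp [insertIdx_eq_inserted]

-- ===== VERDICT (by name: the statement is the Claim_ definition above) =====
theorem merge_root_toml_key_py_spec : Claim_equal_merge_root_toml_key_py := by
  intro text key value_toml _
  exact merge_root_toml_key_py_eq text key value_toml
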